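-- pv_equiv track=rewrite | github.com/Syuko4omi/textchecker | src/module_wordy/wordy_checker.py | find_wordy_expression
-- ===== SOURCE A (Python) =====
-- def find_wordy_expression(one_sentence: str, wordy_expressions) -> list[str]:
--     wordy_parts = []
--     for key in wordy_expressions.keys():
--         if len(one_sentence.split(key)) > 1:
--             splitted_parts = one_sentence.split(key)
--             for idx in range(len(splitted_parts)):
--                 if idx != len(splitted_parts) - 1:
--                     wordy_parts.extend(
--                         find_wordy_expression(splitted_parts[idx], wordy_expressions)
--                     )
--                     wordy_parts.append(key)
--                 else:
--                     wordy_parts.extend(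
--                         find_wordy_expression(splitted_parts[idx], wordy_expressions)
--                     )
--             break
--     return wordy_parts
-- ===== SOURCE B (Python) =====
-- def find_wordy_expression(one_sentence: str, wordy_expressions) -> list[str]:
--     # Layered passes: one pass per key (in dict order), splitting every remaining
--     # fragment token by that key and marking each occurrence with a key token.
--     tokens = [("frag", one_sentence)]
--     for key in wordy_expressions.keys():
--         new_tokens = []
--         for kind, text in tokens:
--             if kind == "key":
--                 new_tokens.append((kind, text))
--             else:
--                 parts = text.split(key)
--                 new_tokens.append(("frag", parts[0]))
--                 for part in parts[1:]:
--                     new_tokens.append(("key", key))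
--                     new_tokens.append(("frag", part))
--         tokens = new_tokens
--     return [text for kind, text in tokens if kind == "key"]
-- ===== Notes on version B (the rewrite author's own statement) =====
-- stated objective: alternative
-- what changed: Replaces A's recursion into every split fragment (rescanning the key list per fragment) with one iterative layered pass per key over a flat token list (fragment/key tokens), collecting the key tokens at the end; correctness rests on the fact that a key never occurs inside the fragments its own split produced nor inside fragments of a sentence it did not occur in.
import Mathlib
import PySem

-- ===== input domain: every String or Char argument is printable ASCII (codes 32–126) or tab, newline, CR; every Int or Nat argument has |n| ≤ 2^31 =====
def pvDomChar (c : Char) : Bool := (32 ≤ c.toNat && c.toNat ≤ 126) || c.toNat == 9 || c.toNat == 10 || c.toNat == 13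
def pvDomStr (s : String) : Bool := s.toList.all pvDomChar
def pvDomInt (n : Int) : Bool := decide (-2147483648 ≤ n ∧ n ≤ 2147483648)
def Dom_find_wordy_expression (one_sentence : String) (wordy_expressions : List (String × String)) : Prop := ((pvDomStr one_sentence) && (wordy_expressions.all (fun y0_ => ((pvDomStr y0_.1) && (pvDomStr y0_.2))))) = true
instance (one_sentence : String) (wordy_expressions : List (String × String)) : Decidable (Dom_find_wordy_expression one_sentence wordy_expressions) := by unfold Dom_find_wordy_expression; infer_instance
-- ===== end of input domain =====

-- B replaces A's per-fragment recursion by flat layered passes: one pass per key over a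
-- token list of fragments and emitted keys; same return value (an 'alternative' objective).

-- ===== PORT A =====

-- the 'for key in keys: if len(val.split(key)) > 1: … break' scan of A; returns the first
-- key whose split has > 1 parts, together with the parts (an empty key raises — outside Pre_).
def pvFirstSplit (s : String) : List String → Option (String × List String)
  | [] => none
  | k :: rest =>
    match PySem.Str.split? s k with
    | some parts => if parts.length > 1 then some (k, parts) else pvFirstSplit s rest
    | none => pvFirstSplit s rest

theorem pvGo_acc (sep : List Char) (fuel : Nat) : ∀ (l cur : List Char) (acc : List (List Char)),
    PySem.Chars.splitOn.go sep fuel l cur acc = acc.reverse ++ PySem.Chars.splitOn.go sep fuel l cur [] := by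
  induction fuel with
  | zero => intro l cur acc; rw [PySem.Chars.splitOn.go.eq_1, PySem.Chars.splitOn.go.eq_1]; simp
  | succ fuel ih =>
    intro l cur acc
    cases l with
    | nil =>
      rw [PySem.Chars.splitOn.go.eq_2 _ _ _ _ (fun hc => Nat.succ_ne_zero fuel hc),
        PySem.Chars.splitOn.go.eq_2 _ _ _ _ (fun hc => Nat.succ_ne_zero fuel hc)]
      simp
    | cons c rest =>
      simp only [PySem.Chars.splitOn.go.eq_3]
      by_cases hp : sep.isPrefixOf (c :: rest) = true
      · rw [if_pos hp, if_pos hp, ih _ [] (cur.reverse :: acc), ih _ [] [cur.reverse]]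
        simp
      · rw [if_neg hp, if_neg hp]
        exact ih rest (c :: cur) acc

-- small arithmetic steps factored out so that the ports' closures stay lightweight
theorem pvArith1 (cu A B C S R : Nat) (hsum : A + S * B = C + S) (hd : C + S = R + 1) :
    cu + A + (S * B + S) = cu + (R + 1) + S := by
  rw [← Nat.add_assoc, Nat.add_assoc cu A, hsum, hd]
theorem pvArith2 (A B cu R S : Nat) (hsum : A + S * B = cu + 1 + R + S) :
    A + S * B = cu + (R + 1) + S := by
  rw [hsum, Nat.add_assoc cu 1 R, Nat.add_comm 1 R]
theorem pvArith3 (C S L fuel : Nat) (hd : C + S = L + 1) (hS : 1 ≤ S) (hL : L < fuel) :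
    C < fuel := by omega
theorem pvArith4 (A C K m s : Nat) (hsum : A + (K * 2 + C) = s + K) (hm : m ≤ C) (hK : 1 ≤ K) :
    A + (2 + m) ≤ s + 1 := by omega
theorem pvArith5 (p A B s : Nat) (hsum : A + B ≤ s + 1) (hB : 2 ≤ B) (hp : p ≤ A) : p < s :=
  Nat.lt_of_succ_le (Nat.le_of_succ_le_succ (le_trans (Nat.add_le_add hp hB) hsum))

theorem pvGo_spec (sep : List Char) (hsep : sep ≠ []) (fuel : Nat) : ∀ (l cur : List Char), l.length < fuel →
    PySem.Chars.splitOn.go sep fuel l cur [] ≠ [] ∧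
    ((PySem.Chars.splitOn.go sep fuel l cur []).map List.length).sum
      + sep.length * (PySem.Chars.splitOn.go sep fuel l cur []).length
      = cur.length + l.length + sep.length := by
  induction fuel with
  | zero => intro l cur h; exact absurd h (Nat.not_lt_zero _)
  | succ fuel ih =>
    intro l cur h
    cases l with
    | nil =>
      rw [PySem.Chars.splitOn.go.eq_2 _ _ _ _ (fun hc => Nat.succ_ne_zero fuel hc)]
      simp [Nat.add_comm]
    | cons c rest =>
      simp only [PySem.Chars.splitOn.go.eq_3]
      by_cases hp : sep.isPrefixOf (c :: rest) = true
      · rw [if_pos hp]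
        have hle : sep.length ≤ (c :: rest).length := (List.isPrefixOf_iff_prefix.mp hp).length_le
        have hd : (List.drop sep.length (c :: rest)).length + sep.length = (c :: rest).length := by
          rw [List.length_drop]; exact Nat.sub_add_cancel hle
        have hsep1 : 1 ≤ sep.length := by
          cases sep with | nil => exact absurd rfl hsep | cons _ _ => exact Nat.succ_le_succ (Nat.zero_le _)
        have hdrop : (List.drop sep.length (c :: rest)).length < fuel :=
          pvArith3 _ _ rest.length fuel (by simpa using hd) hsep1 (by simpa using h)
        obtain ⟨hne, hsum⟩ := ih (List.drop sep.length (c :: rest)) [] hdrop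
        rw [pvGo_acc]
        refine ⟨by simp, ?_⟩
        simp only [List.reverse_singleton, List.singleton_append, List.map_cons, List.sum_cons,
          List.length_cons, List.length_reverse, List.length_nil, Nat.zero_add] at hsum ⊢
        rw [Nat.mul_succ]
        exact pvArith1 _ _ _ _ _ _ hsum (by simpa using hd)
      · rw [if_neg hp]
        obtain ⟨hne, hsum⟩ := ih rest (c :: cur) (Nat.lt_of_succ_lt_succ (by simpa using h))
        refine ⟨hne, ?_⟩
        simp only [List.length_cons] at hsum ⊢
        exact pvArith2 _ _ _ _ _ (by simpa using hsum)

theorem pvSplit?_facts (s k : String) (parts : List String)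
    (h : PySem.Str.split? s k = some parts) :
    parts ≠ [] ∧ 1 ≤ k.length ∧
    (parts.map String.length).sum + k.length * parts.length = s.length + k.length := by
  unfold PySem.Str.split? PySem.Chars.split? at h
  by_cases he : k.toList.isEmpty = true
  · rw [he] at h; simp at h
  · rw [if_neg he] at h
    simp only [Option.map_some, Option.some.injEq] at h
    have hkne : k.toList ≠ [] := by simpa [List.isEmpty_iff] using he
    obtain ⟨hne, hsum⟩ :=
      pvGo_spec k.toList hkne (s.toList.length + 1) s.toList [] (Nat.lt_succ_self _)
    rw [← PySem.Chars.splitOn] at hne hsum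
    refine ⟨?_, ?_, ?_⟩
    · intro hnil; rw [← h] at hnil; simp at hnil; exact hne hnil
    · have := List.length_pos_iff.mpr hkne; simpa [String.length_toList] using this
    · rw [← h]
      simp only [List.map_map, List.length_map, Function.comp_def]
      have hmap : ((PySem.Chars.splitOn s.toList k.toList).map (fun cs => (String.ofList cs).length)).sum
          = ((PySem.Chars.splitOn s.toList k.toList).map List.length).sum := by
        congr 1; apply List.map_congr_left; intro cs _; simp
      rw [hmap]
      simp only [List.length_nil, Nat.zero_add, String.length_toList] at hsum
      exact hsum

theorem pvFirstSplit_facts (s : String) (keys : List String) (k : String) (parts : List String)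
    (h : pvFirstSplit s keys = some (k, parts)) :
    2 ≤ parts.length ∧ (parts.map String.length).sum + parts.length ≤ s.length + 1 := by
  induction keys with
  | nil => simp [pvFirstSplit] at h
  | cons k0 rest ih =>
    rw [pvFirstSplit] at h
    cases hs : PySem.Str.split? s k0 with
    | none => rw [hs] at h; exact ih h
    | some ps =>
      rw [hs] at h
      dsimp only at h
      by_cases hl : ps.length > 1
      · rw [if_pos hl] at h
        simp only [Option.some.injEq, Prod.mk.injEq] at h
        obtain ⟨rfl, rfl⟩ := h
        obtain ⟨_, hk1, hsum⟩ := pvSplit?_facts s k0 ps hs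
        refine ⟨hl, ?_⟩
        obtain ⟨m, hm2⟩ : ∃ m, ps.length = 2 + m := Nat.exists_eq_add_of_le hl
        rw [hm2] at hsum ⊢
        rw [Nat.mul_add] at hsum
        have hm : m ≤ k0.length * m := Nat.le_mul_of_pos_left _ hk1
        exact pvArith4 _ _ _ _ _ hsum hm hk1
      · rw [if_neg hl] at h; exact ih h

theorem pvFirstSplit_mem_lt (s : String) (keys : List String) (k : String) (parts : List String)
    (h : pvFirstSplit s keys = some (k, parts)) : ∀ p ∈ parts, p.length < s.length := by
  intro p hp
  obtain ⟨h2, hsum⟩ := pvFirstSplit_facts s keys k parts h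
  have hps : p.length ≤ (parts.map String.length).sum := List.le_sum_of_mem (List.mem_map_of_mem hp)
  exact pvArith5 _ _ _ _ hsum h2 hps

def find_wordy_expression_core (keys : List String) (s : String) : List String :=
  match h : pvFirstSplit s keys with
  | none => []
  | some kp =>
      List.intercalate [kp.1] (kp.2.attach.map (fun p => find_wordy_expression_core keys p.1))
termination_by s.length
decreasing_by
  exact pvFirstSplit_mem_lt s keys kp.1 kp.2 h p.1 p.2

-- port of A: recurse on the first matching split; the idx-loop extends with the recursive
-- result of every part and appends the key after all but the last, i.e. it interleaves
def find_wordy_expression (one_sentence : String) (wordy_expressions : List (String × String)) : List String :=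
  find_wordy_expression_core (PySem.List.dedup (wordy_expressions.map Prod.fst)) one_sentence

-- ===== PORT B =====

-- a token of Source B's flat list: a text fragment still being cut up, or an emitted key
inductive PVTok where
  | frag : String → PVTok
  | key : String → PVTok
deriving DecidableEq, Repr

-- Source B's 'for part in parts[1:]: append key; append fragment'
def pvTail (k : String) : List String → List PVTok
  | [] => []
  | p :: rest => PVTok.key k :: PVTok.frag p :: pvTail k rest

-- Source B's inner loop body: what one token contributes to new_tokens for this key
def pvSplitTok (k : String) : PVTok → List PVTok
  | .key k' => [.key k']
  | .frag s =>
    match PySem.Str.split? s k with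
    | some (p0 :: rest) => PVTok.frag p0 :: pvTail k rest
    | some [] => []        -- split never returns []; dead branch
    | none => [.frag s]    -- empty key: Python raises here, outside Pre_

-- port of B: one layered pass per dict key over the token list, then collect the keys
def find_wordy_expression_alt (one_sentence : String) (wordy_expressions : List (String × String)) : List String :=
  (((PySem.List.dedup (wordy_expressions.map Prod.fst)).foldl
      (fun toks k => toks.flatMap (pvSplitTok k)) [PVTok.frag one_sentence]).filterMap
    (fun t => match t with | .key k => some k | .frag _ => none))

-- ===== PRECONDITION & SPEC =====
-- Pre_ excludes dicts containing the empty-string key: on those Python's str.split('')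
-- raises ValueError in A (and likewise in B), so A never returns a value there.
def Pre_find_wordy_expression (one_sentence : String) (wordy_expressions : List (String × String)) : Prop :=
  ∀ p ∈ wordy_expressions, p.1 ≠ ""
instance (one_sentence : String) (wordy_expressions : List (String × String)) : Decidable (Pre_find_wordy_expression one_sentence wordy_expressions) := by unfold Pre_find_wordy_expression; infer_instance

def pvWitness_find_wordy_expression : String × (List (String × String)) :=
  ("ab ab c", [("ab", "x"), ("c", "y")])

def Spec_find_wordy_expression (one_sentence : String) (wordy_expressions : List (String × String)) (out : List String) : Prop := out = find_wordy_expression_alt one_sentence wordy_expressions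
instance (one_sentence : String) (wordy_expressions : List (String × String)) (out : List String) : Decidable (Spec_find_wordy_expression one_sentence wordy_expressions out) := by unfold Spec_find_wordy_expression; infer_instance

-- ===== CLAIM (what is proved, stated in full; the proofs are below) =====
def Claim_equal_find_wordy_expression : Prop := ∀ (one_sentence : String) (wordy_expressions : List (String × String)), Dom_find_wordy_expression one_sentence wordy_expressions → Pre_find_wordy_expression one_sentence wordy_expressions → Spec_find_wordy_expression one_sentence wordy_expressions (find_wordy_expression one_sentence wordy_expressions)

-- ===== LEMMAS AND PROOFS =====


-- infix ↔ occurrence at a drop position (cited through PySem's isIn bridge)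
theorem pvInfix_drop (sep l : List Char) : sep <:+: l ↔ ∃ j, sep <+: l.drop j := by
  rw [← PySem.Chars.isIn_iff_infix, ← PySem.Chars.exists_prefix_drop_iff_isIn]

-- if sep does not occur, go returns the single untouched piece
theorem pvGo_id (sep : List Char) (fuel : Nat) : ∀ (l cur : List Char), l.length < fuel →
    ¬ sep <:+: l → PySem.Chars.splitOn.go sep fuel l cur [] = [cur.reverse ++ l] := by
  induction fuel with
  | zero => intro l cur h; exact absurd h (Nat.not_lt_zero _)
  | succ fuel ih =>
    intro l cur h hocc
    cases l with
    | nil =>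
      rw [PySem.Chars.splitOn.go.eq_2 _ _ _ _ (fun hc => Nat.succ_ne_zero fuel hc)]
      simp
    | cons c rest =>
      simp only [PySem.Chars.splitOn.go.eq_3]
      by_cases hp : sep.isPrefixOf (c :: rest) = true
      · exact absurd (List.isPrefixOf_iff_prefix.mp hp).isInfix hocc
      · rw [if_neg hp, ih rest (c :: cur) (Nat.lt_of_succ_lt_succ (by simpa using h))
          (fun hc => hocc (hc.trans (List.suffix_cons c rest).isInfix))]
        simp

-- if sep does occur, go returns at least two pieces
theorem pvGo_two (sep : List Char) (hsep : sep ≠ []) (fuel : Nat) : ∀ (l cur : List Char), l.length < fuel →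
    sep <:+: l → 2 ≤ (PySem.Chars.splitOn.go sep fuel l cur []).length := by
  induction fuel with
  | zero => intro l cur h; exact absurd h (Nat.not_lt_zero _)
  | succ fuel ih =>
    intro l cur h hocc
    cases l with
    | nil =>
      rw [List.infix_nil] at hocc
      exact absurd hocc hsep
    | cons c rest =>
      simp only [PySem.Chars.splitOn.go.eq_3]
      by_cases hp : sep.isPrefixOf (c :: rest) = true
      · rw [if_pos hp]
        have hle : sep.length ≤ (c :: rest).length := (List.isPrefixOf_iff_prefix.mp hp).length_le
        have hsep1 : 1 ≤ sep.length := by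
          cases sep with | nil => exact absurd rfl hsep | cons _ _ => exact Nat.succ_le_succ (Nat.zero_le _)
        have hdrop : (List.drop sep.length (c :: rest)).length < fuel := by
          rw [List.length_drop]
          exact pvArith3 _ sep.length rest.length fuel
            (by simpa using Nat.sub_add_cancel hle) hsep1 (by simpa using h)
        obtain ⟨hne, -⟩ := pvGo_spec sep hsep fuel (List.drop sep.length (c :: rest)) [] hdrop
        rw [pvGo_acc]
        cases hgo : PySem.Chars.splitOn.go sep fuel (List.drop sep.length (c :: rest)) [] [] with
        | nil => exact absurd hgo hne
        | cons a b => simp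
      · rw [if_neg hp]
        refine ih rest (c :: cur) (Nat.lt_of_succ_lt_succ (by simpa using h)) ?_
        obtain ⟨j, hj⟩ := (pvInfix_drop sep (c :: rest)).mp hocc
        cases j with
        | zero => exact absurd (by simpa using hj) (fun hx => hp (List.isPrefixOf_iff_prefix.mpr hx))
        | succ j => exact (pvInfix_drop sep rest).mpr ⟨j, by simpa using hj⟩

-- every piece go returns is an infix of the whole input
theorem pvGo_infix (sep : List Char) (hsep : sep ≠ []) (fuel : Nat) : ∀ (l cur : List Char), l.length < fuel →
    ∀ p ∈ PySem.Chars.splitOn.go sep fuel l cur [], p <:+: (cur.reverse ++ l) := by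
  induction fuel with
  | zero => intro l cur h; exact absurd h (Nat.not_lt_zero _)
  | succ fuel ih =>
    intro l cur h p hp
    cases l with
    | nil =>
      rw [PySem.Chars.splitOn.go.eq_2 _ _ _ _ (fun hc => Nat.succ_ne_zero fuel hc)] at hp
      simp at hp
      subst hp; simp
    | cons c rest =>
      simp only [PySem.Chars.splitOn.go.eq_3] at hp
      by_cases hpr : sep.isPrefixOf (c :: rest) = true
      · rw [if_pos hpr, pvGo_acc] at hp
        have hle : sep.length ≤ (c :: rest).length := (List.isPrefixOf_iff_prefix.mp hpr).length_le
        have hsep1 : 1 ≤ sep.length := by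
          cases sep with | nil => exact absurd rfl hsep | cons _ _ => exact Nat.succ_le_succ (Nat.zero_le _)
        have hdrop : (List.drop sep.length (c :: rest)).length < fuel := by
          rw [List.length_drop]
          exact pvArith3 _ sep.length rest.length fuel
            (by simpa using Nat.sub_add_cancel hle) hsep1 (by simpa using h)
        simp only [List.reverse_singleton, List.singleton_append, List.mem_cons] at hp
        cases hp with
        | inl hp => subst hp; exact (List.prefix_append cur.reverse (c :: rest)).isInfix
        | inr hp =>
          have := ih (List.drop sep.length (c :: rest)) [] hdrop p hp
          simp only [List.reverse_nil, List.nil_append] at this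
          exact this.trans ((List.drop_suffix _ _).isInfix.trans
            ((List.suffix_append cur.reverse (c :: rest)).isInfix))
      · rw [if_neg hpr] at hp
        have := ih rest (c :: cur) (Nat.lt_of_succ_lt_succ (by simpa using h)) p hp
        simpa using this

-- greedy split: no piece go returns contains sep, given no occurrence starts inside cur
theorem pvGo_avoid (sep : List Char) (hsep : sep ≠ []) (fuel : Nat) : ∀ (l cur : List Char), l.length < fuel →
    (∀ i, i < cur.length → ¬ sep <+: (cur.reverse ++ l).drop i) →
    ∀ p ∈ PySem.Chars.splitOn.go sep fuel l cur [], ¬ sep <:+: p := by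
  induction fuel with
  | zero => intro l cur h; exact absurd h (Nat.not_lt_zero _)
  | succ fuel ih =>
    intro l cur h hinv p hp hocc
    have hsep1 : 1 ≤ sep.length := by
      cases sep with | nil => exact absurd rfl hsep | cons _ _ => exact Nat.succ_le_succ (Nat.zero_le _)
    have hcurcase : ∀ (tail : List Char), p = cur.reverse → False := by
      intro tail hpe
      subst hpe
      obtain ⟨j, hj⟩ := (pvInfix_drop sep cur.reverse).mp hocc
      have hjlen : j + sep.length ≤ cur.reverse.length := by
        have := hj.length_le
        rw [List.length_drop] at this
        omega
      have hjlt : j < cur.length := by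
        rw [List.length_reverse] at hjlen; omega
      refine hinv j hjlt ?_
      rw [List.drop_append_of_le_length (by rw [List.length_reverse]; omega)]
      exact hj.trans (List.prefix_append _ _)
    cases l with
    | nil =>
      rw [PySem.Chars.splitOn.go.eq_2 _ _ _ _ (fun hc => Nat.succ_ne_zero fuel hc)] at hp
      simp at hp
      exact hcurcase [] hp
    | cons c rest =>
      simp only [PySem.Chars.splitOn.go.eq_3] at hp
      by_cases hpr : sep.isPrefixOf (c :: rest) = true
      · rw [if_pos hpr, pvGo_acc] at hp
        have hle : sep.length ≤ (c :: rest).length := (List.isPrefixOf_iff_prefix.mp hpr).length_le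
        have hdrop : (List.drop sep.length (c :: rest)).length < fuel := by
          rw [List.length_drop]
          exact pvArith3 _ sep.length rest.length fuel
            (by simpa using Nat.sub_add_cancel hle) hsep1 (by simpa using h)
        simp only [List.reverse_singleton, List.singleton_append, List.mem_cons] at hp
        cases hp with
        | inl hpe => exact hcurcase (c :: rest) hpe
        | inr hpe =>
          exact ih (List.drop sep.length (c :: rest)) [] hdrop
            (fun i hi => absurd hi (Nat.not_lt_zero i)) p hpe hocc
      · rw [if_neg hpr] at hp
        refine ih rest (c :: cur) (Nat.lt_of_succ_lt_succ (by simpa using h)) ?_ p hp hocc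
        intro i hi
        have hfull : (c :: cur).reverse ++ rest = cur.reverse ++ (c :: rest) := by simp
        rw [hfull]
        simp only [List.length_cons] at hi
        rcases Nat.lt_or_ge i cur.length with hlt | hge
        · exact hinv i hlt
        · have hieq : i = cur.length := by omega
          subst hieq
          have hdl : List.drop cur.length (cur.reverse ++ (c :: rest)) = c :: rest := by
            rw [show cur.length = cur.reverse.length by simp, List.drop_left]
          rw [hdl]
          exact fun hc => hpr (List.isPrefixOf_iff_prefix.mpr hc)

-- lift to the String-level split? (nonempty key)
theorem pvSplit?_some (s k : String) (hk : k ≠ "") :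
    PySem.Str.split? s k
      = some ((PySem.Chars.splitOn s.toList k.toList).map String.ofList) := by
  have hkl : k.toList ≠ [] := fun hc => hk (by simpa using congrArg String.ofList hc)
  unfold PySem.Str.split? PySem.Chars.split?
  rw [if_neg (by simpa [List.isEmpty_iff] using hkl)]
  rfl

theorem pvSplit_id (s k : String) (hk : k ≠ "") (h : ¬ k.toList <:+: s.toList) :
    PySem.Str.split? s k = some [s] := by
  have hkl : k.toList ≠ [] := fun hc => hk (by simpa using congrArg String.ofList hc)
  rw [pvSplit?_some s k hk]
  rw [PySem.Chars.splitOn, pvGo_id k.toList (s.toList.length + 1) s.toList [] (Nat.lt_succ_self _) h]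
  simp

theorem pvSplit_two (s k : String) (hk : k ≠ "") (h : k.toList <:+: s.toList)
    (parts : List String) (hp : PySem.Str.split? s k = some parts) : 2 ≤ parts.length := by
  have hkl : k.toList ≠ [] := fun hc => hk (by simpa using congrArg String.ofList hc)
  rw [pvSplit?_some s k hk] at hp
  have := pvGo_two k.toList hkl (s.toList.length + 1) s.toList [] (Nat.lt_succ_self _) h
  rw [← PySem.Chars.splitOn] at this
  simp only [Option.some.injEq] at hp
  subst hp
  simpa using this

theorem pvSplit_mem (s k : String) (hk : k ≠ "") (parts : List String)
    (hp : PySem.Str.split? s k = some parts) : ∀ p ∈ parts,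
    p.toList <:+: s.toList ∧ ¬ k.toList <:+: p.toList := by
  have hkl : k.toList ≠ [] := fun hc => hk (by simpa using congrArg String.ofList hc)
  rw [pvSplit?_some s k hk] at hp
  simp only [Option.some.injEq] at hp
  subst hp
  intro p hp
  simp only [List.mem_map] at hp
  obtain ⟨cs, hcs, rfl⟩ := hp
  rw [PySem.Chars.splitOn] at hcs
  constructor
  · have := pvGo_infix k.toList hkl (s.toList.length + 1) s.toList [] (Nat.lt_succ_self _) cs hcs
    simpa using this
  · have := pvGo_avoid k.toList hkl (s.toList.length + 1) s.toList []
      (Nat.lt_succ_self _) (fun i hi => absurd hi (Nat.not_lt_zero i)) cs hcs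
    simpa using this

-- pvFirstSplit skips keys that do not occur, and stops at the first one that does
theorem pvFirst_skip (s k : String) (rest : List String) (hk : k ≠ "")
    (h : ¬ k.toList <:+: s.toList) :
    pvFirstSplit s (k :: rest) = pvFirstSplit s rest := by
  rw [pvFirstSplit, pvSplit_id s k hk h]
  simp

theorem pvFirst_hit (s k : String) (rest : List String) (hk : k ≠ "")
    (h : k.toList <:+: s.toList) (parts : List String)
    (hp : PySem.Str.split? s k = some parts) :
    pvFirstSplit s (k :: rest) = some (k, parts) := by
  rw [pvFirstSplit, hp]
  simp [Nat.lt_of_lt_of_le Nat.one_lt_two (pvSplit_two s k hk h parts hp)]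

theorem pvFirst_pre (s : String) : ∀ (pre keys : List String),
    (∀ k0 ∈ pre, k0 ≠ "" ∧ ¬ k0.toList <:+: s.toList) →
    pvFirstSplit s (pre ++ keys) = pvFirstSplit s keys := by
  intro pre
  induction pre with
  | nil => intro keys _; rfl
  | cons k0 pre ih =>
    intro keys hh
    obtain ⟨hk0, hocc0⟩ := hh k0 (List.mem_cons_self)
    rw [List.cons_append, pvFirst_skip s k0 (pre ++ keys) hk0 hocc0]
    exact ih keys (fun k hk => hh k (List.mem_cons_of_mem _ hk))

-- ===== the layered-pass (B) machinery =====

def pvRunKeys (keys : List String) (toks : List PVTok) : List PVTok :=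
  keys.foldl (fun toks k => toks.flatMap (pvSplitTok k)) toks

def pvKeysOut (toks : List PVTok) : List String :=
  toks.filterMap (fun t => match t with | .key k => some k | .frag _ => none)

theorem pvRun_nil (keys : List String) : pvRunKeys keys [] = [] := by
  induction keys with
  | nil => rfl
  | cons k rest ih => simpa [pvRunKeys, List.foldl_cons] using ih

theorem pvRun_append (keys : List String) : ∀ (xs ys : List PVTok),
    pvRunKeys keys (xs ++ ys) = pvRunKeys keys xs ++ pvRunKeys keys ys := by
  induction keys with
  | nil => intro xs ys; rfl
  | cons k rest ih =>
    intro xs ys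
    simp only [pvRunKeys, List.foldl_cons, List.flatMap_append]
    exact ih _ _

theorem pvRun_key (keys : List String) (k : String) :
    pvRunKeys keys [PVTok.key k] = [PVTok.key k] := by
  induction keys with
  | nil => rfl
  | cons k' rest ih =>
    simpa [pvRunKeys, List.foldl_cons, pvSplitTok] using ih

theorem pvKeysOut_append (xs ys : List PVTok) :
    pvKeysOut (xs ++ ys) = pvKeysOut xs ++ pvKeysOut ys := by
  simp [pvKeysOut]

theorem pvTail_out (rest : List String) (k : String) (f : String → List String) :
    ∀ (tl : List String), (∀ p ∈ tl, pvKeysOut (pvRunKeys rest [PVTok.frag p]) = f p) →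
    pvKeysOut (pvRunKeys rest (pvTail k tl)) = tl.flatMap (fun p => k :: f p) := by
  intro tl
  induction tl with
  | nil => intro _; simp [pvTail, pvRun_nil, pvKeysOut]
  | cons p tl ih =>
    intro hf
    rw [pvTail]
    have hsplit : PVTok.key k :: PVTok.frag p :: pvTail k tl
        = [PVTok.key k] ++ [PVTok.frag p] ++ pvTail k tl := by simp
    rw [hsplit, pvRun_append, pvRun_append, pvRun_key, pvKeysOut_append, pvKeysOut_append,
      ih (fun q hq => hf q (List.mem_cons_of_mem _ hq)), hf p List.mem_cons_self]
    simp [pvKeysOut]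

theorem pvIntercalate (k : String) (f : String → List String) : ∀ (tl : List String) (p0 : String),
    List.intercalate [k] ((p0 :: tl).map f) = f p0 ++ tl.flatMap (fun p => k :: f p) := by
  intro tl
  induction tl with
  | nil => intro p0; simp [List.intercalate]
  | cons p1 tl ih =>
    intro p0
    have h1 := ih p1
    simp only [List.map_cons, List.intercalate] at h1 ⊢
    rw [List.intersperse_cons₂, List.flatten_cons, List.flatten_cons, h1]
    simp

theorem pvSplitTok_frag (k s : String) : pvSplitTok k (PVTok.frag s)
    = match PySem.Str.split? s k with
      | some (p0 :: rest) => PVTok.frag p0 :: pvTail k rest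
      | some [] => []
      | none => [PVTok.frag s] := rfl

-- the main induction: layered passes over the remaining keys = A's recursion over the
-- full key list, given that the already-consumed keys do not occur in the fragment
theorem pvMain : ∀ (keys pre : List String) (s : String),
    (∀ k ∈ pre ++ keys, k ≠ "") → (∀ k0 ∈ pre, ¬ k0.toList <:+: s.toList) →
    pvKeysOut (pvRunKeys keys [PVTok.frag s]) = find_wordy_expression_core (pre ++ keys) s := by
  intro keys
  induction keys with
  | nil =>
    intro pre s hne hpre
    have h0 : pvFirstSplit s (pre ++ []) = none := by
      rw [pvFirst_pre s pre [] (fun k0 hk0 => ⟨hne k0 (by simpa using hk0), hpre k0 hk0⟩)]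
      rfl
    rw [find_wordy_expression_core, h0]
    rfl
  | cons k rest ih =>
    intro pre s hne hpre
    have hk : k ≠ "" := hne k (by simp)
    by_cases hocc : k.toList <:+: s.toList
    · -- k occurs: the pass splits the fragment, A picks k as first matching key
      obtain ⟨parts, hp⟩ : ∃ parts, PySem.Str.split? s k = some parts := by
        rw [pvSplit?_some s k hk]; exact ⟨_, rfl⟩
      have h2 : 2 ≤ parts.length := pvSplit_two s k hk hocc parts hp
      obtain ⟨p0, tl, rfl⟩ : ∃ p0 tl, parts = p0 :: tl := by
        cases parts with
        | nil => simp at h2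
        | cons a b => exact ⟨a, b, rfl⟩
      have hfs : pvFirstSplit s (pre ++ k :: rest) = some (k, p0 :: tl) := by
        rw [pvFirst_pre s pre (k :: rest)
          (fun k0 hk0 => ⟨hne k0 (List.mem_append_left _ hk0), hpre k0 hk0⟩)]
        exact pvFirst_hit s k rest hk hocc _ hp
      have hmem := pvSplit_mem s k hk (p0 :: tl) hp
      -- recursive agreement on every fragment, via the IH with pre ++ [k]
      have hfrag : ∀ p ∈ p0 :: tl, pvKeysOut (pvRunKeys rest [PVTok.frag p])
          = find_wordy_expression_core (pre ++ k :: rest) p := by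
        intro p hpmem
        obtain ⟨hinf, havoid⟩ := hmem p hpmem
        have := ih (pre ++ [k]) p
          (by intro k' hk'; refine hne k' ?_; rw [List.append_cons]; exact hk')
          (by
            intro k0 hk0
            rcases List.mem_append.mp hk0 with hin | hin
            · exact fun hc => hpre k0 hin (hc.trans hinf)
            · simp only [List.mem_singleton] at hin; subst hin; exact havoid)
        rw [this, ← List.append_cons]
      -- evaluate one pass of B on the fragment token
      have hpass : pvRunKeys (k :: rest) [PVTok.frag s]
          = pvRunKeys rest (PVTok.frag p0 :: pvTail k tl) := by
        have harg : List.flatMap (pvSplitTok k) [PVTok.frag s] = PVTok.frag p0 :: pvTail k tl := by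
          rw [List.flatMap_cons, List.flatMap_nil, List.append_nil, pvSplitTok_frag, hp]
        unfold pvRunKeys
        rw [List.foldl_cons, harg]
      rw [hpass, find_wordy_expression_core, hfs]
      have hattach : (((p0 :: tl).attach.map
          (fun p => find_wordy_expression_core (pre ++ k :: rest) p.1)) : List (List String))
          = (p0 :: tl).map (find_wordy_expression_core (pre ++ k :: rest)) := by
        simp
      simp only [hattach]
      have hsplit2 : PVTok.frag p0 :: pvTail k tl = [PVTok.frag p0] ++ pvTail k tl := by simp
      rw [hsplit2, pvRun_append, pvKeysOut_append,
        pvTail_out rest k (find_wordy_expression_core (pre ++ k :: rest)) tl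
          (fun p hptl => hfrag p (List.mem_cons_of_mem _ hptl)),
        hfrag p0 List.mem_cons_self, pvIntercalate]
    · -- k does not occur: the pass leaves the fragment untouched, A skips k
      have hpass : pvRunKeys (k :: rest) [PVTok.frag s] = pvRunKeys rest [PVTok.frag s] := by
        have harg : List.flatMap (pvSplitTok k) [PVTok.frag s] = [PVTok.frag s] := by
          rw [List.flatMap_cons, List.flatMap_nil, List.append_nil, pvSplitTok_frag,
            pvSplit_id s k hk hocc]
          rfl
        unfold pvRunKeys
        rw [List.foldl_cons, harg]
      rw [hpass, ih (pre ++ [k]) s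
        (by intro k' hk'; refine hne k' ?_; rw [List.append_cons]; exact hk')
        (by
          intro k0 hk0
          rcases List.mem_append.mp hk0 with hin | hin
          · exact hpre k0 hin
          · simp only [List.mem_singleton] at hin; subst hin; exact hocc),
        ← List.append_cons]


-- ===== VERDICT (by name: the statement is the Claim_ definition above) =====
theorem find_wordy_expression_spec : Claim_equal_find_wordy_expression := by
  intro s wes _ hpre
  unfold Spec_find_wordy_expression find_wordy_expression find_wordy_expression_alt
  have := pvMain (PySem.List.dedup (wes.map Prod.fst)) [] s
    (by
      intro k hk
      simp only [List.nil_append, PySem.List.mem_dedup, List.mem_map] at hk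
      obtain ⟨p, hp, rfl⟩ := hk
      exact hpre p hp)
    (by intro k0 hk0; simp at hk0)
  simp only [List.nil_append] at this
  rw [← this]
  rfl
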